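-- pv_equiv track=rewrite | github.com/jensenerik/aoc2023 | solutions/solution08.py | run_ghosts
-- ===== SOURCE A (Python) =====
-- import math
-- from typing import Dict, List, Tuple
--
-- def run_ghosts(instructions: List[str], pointers: Dict[str, Tuple[str, ...]]) -> int:
--     locations = [key for key in pointers.keys() if key[-1] == "A"]
--     steps = 0
--     counts = [0] * len(locations)
--
--     while not all(counts):
--         for direction in instructions:
--             new_locations = []
--             steps += 1
--             for i, location in enumerate(locations):
--                 choices = pointers[location]
--                 new_loc = choices[0] if direction == "L" else choices[1]
--                 new_locations.append(new_loc)
--                 if new_loc[-1] == "Z" and counts[i] == 0: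
--                     counts[i] = steps
--             locations = new_locations
--     return math.lcm(*counts)
-- ===== SOURCE B (Python) =====
-- import math
--
--
-- def run_ghosts(instructions, pointers):
--     def count_steps(node):
--         steps = 0
--         while True:
--             choices = pointers[node]
--             direction = instructions[steps % len(instructions)]
--             node = choices[0] if direction == "L" else choices[1]
--             steps += 1
--             if node[-1] == "Z":
--                 return steps
--     return math.lcm(*[count_steps(key) for key in pointers if key[-1] == "A"])
-- ===== Notes on version B (the rewrite author's own statement) =====
-- stated objective: simpler
-- what changed: Replaces the lockstep parallel simulation of all ghosts (while-loop over whole instruction blocks mutating parallel locations/counts lists) by an independent per-ghost walk helper that cycles instructions via steps % len and returns the first-Z step count, with math.lcm mapped over the start keys.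
import Mathlib
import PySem

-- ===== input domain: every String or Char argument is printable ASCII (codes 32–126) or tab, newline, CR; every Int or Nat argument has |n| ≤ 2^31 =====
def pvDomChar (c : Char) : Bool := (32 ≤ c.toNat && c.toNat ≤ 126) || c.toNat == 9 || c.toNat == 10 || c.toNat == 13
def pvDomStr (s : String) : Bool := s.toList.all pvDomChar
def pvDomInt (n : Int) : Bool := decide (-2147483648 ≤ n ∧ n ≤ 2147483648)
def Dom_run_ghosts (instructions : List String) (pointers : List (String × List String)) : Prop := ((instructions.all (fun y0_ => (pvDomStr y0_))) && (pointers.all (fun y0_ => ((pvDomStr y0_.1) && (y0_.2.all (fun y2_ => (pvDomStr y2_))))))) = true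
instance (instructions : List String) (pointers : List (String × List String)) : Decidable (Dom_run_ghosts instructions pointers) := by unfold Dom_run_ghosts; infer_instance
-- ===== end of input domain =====

-- B replaces A's lockstep parallel simulation of all ghosts by an independent per-ghost
-- first-Z walk mapped under lcm (objective: simpler decomposition; equivalence of the
-- RETURN value is what is proved, neither program mutates its arguments).

-- shared helper: the Python `s[-1] == "C"` test (both sources contain it literally)
def pvLastIs (s : String) (c : Char) : Bool := PySem.Str.pyGet? s (-1) == some c

-- ===== PORT A =====
-- one `direction` iteration of A's inner for-loop: per-ghost pointwise update of
-- (locations, counts) plus the steps counter (A's index-wise mutation is pointwise)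
def pvBlockStep (d : PySem.Dict String (List String)) (dir : String)
    (st : List String × List Nat × Nat) : List String × List Nat × Nat :=
  let steps := st.2.2 + 1
  let pairs := (st.1.zip st.2.1).map (fun lc =>
    let choices := PySem.Dict.getD d lc.1 []
    let newLoc := if dir == "L" then choices.getD 0 "" else choices.getD 1 ""
    (newLoc, if pvLastIs newLoc 'Z' && lc.2 == 0 then steps else lc.2))
  (pairs.map Prod.fst, pairs.map Prod.snd, steps)

-- A's `while not all(counts)` loop; the fuel only makes it total, inside Pre_ it is
-- never exhausted (the loop exits after at most `d.keys.length` blocks)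
def pvLoopA (instructions : List String) (d : PySem.Dict String (List String)) :
    Nat → List String × List Nat × Nat → List Nat
  | 0, st => st.2.1
  | fuel+1, st =>
    if st.2.1.all (fun c => c != 0) then st.2.1
    else pvLoopA instructions d fuel (instructions.foldl (fun s dir => pvBlockStep d dir s) st)

def run_ghosts (instructions : List String) (pointers : List (String × List String)) : Int :=
  let d := PySem.Dict.ofList pointers
  let locations := d.keys.filter (fun key => pvLastIs key 'A')
  let counts := pvLoopA instructions d (d.keys.length + 1)
      (locations, List.replicate locations.length 0, 0)
  ((counts.foldl Nat.lcm 1 : Nat) : Int)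

-- ===== PORT B =====
-- Source B's per-ghost walk `count_steps`; fuel only for totality, never exhausted inside Pre_
def pvCountSteps (instructions : List String) (d : PySem.Dict String (List String)) :
    Nat → String → Nat → Nat
  | 0, _, steps => steps
  | fuel+1, node, steps =>
    let choices := PySem.Dict.getD d node []
    let dir := instructions.getD (steps % instructions.length) ""
    let newNode := if dir == "L" then choices.getD 0 "" else choices.getD 1 ""
    if pvLastIs newNode 'Z' then steps + 1
    else pvCountSteps instructions d fuel newNode (steps + 1)

def run_ghosts_alt (instructions : List String) (pointers : List (String × List String)) : Int :=
  let d := PySem.Dict.ofList pointers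
  let starts := d.keys.filter (fun key => pvLastIs key 'A')
  (((starts.map (fun key =>
      pvCountSteps instructions d (d.keys.length * instructions.length + 1) key 0)).foldl
      Nat.lcm 1 : Nat) : Int)

-- ===== PRECONDITION & SPEC =====
-- specification-level single Python step at time t (none = the step raises)
def pvStep (instructions : List String) (d : PySem.Dict String (List String))
    (t : Nat) (loc : String) : Option String :=
  match PySem.Dict.get? d loc with
  | none => none
  | some choices =>
    match instructions[t % instructions.length]? with
    | none => none
    | some dir =>
      match (if dir == "L" then choices[0]? else choices[1]?) with
      | none => none
      | some newLoc => if newLoc = "" then none else some newLoc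

def pvTraj (instructions : List String) (d : PySem.Dict String (List String))
    (s : String) : Nat → Option String
  | 0 => some s
  | t+1 => (pvTraj instructions d s t).bind (pvStep instructions d t)

-- first step count (≥ 1) at which the ghost stands on a node ending in 'Z'
def pvFirstZ? (instructions : List String) (d : PySem.Dict String (List String))
    (bound : Nat) (s : String) : Option Nat :=
  ((List.range bound).find? (fun t =>
    ((pvTraj instructions d s (t+1)).map (fun n => pvLastIs n 'Z')).getD false)).map (· + 1)

def pvC (instructions : List String) (d : PySem.Dict String (List String)) (s : String) : Nat :=
  (pvFirstZ? instructions d (d.keys.length * instructions.length) s).getD 0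

-- the step count at which A's while-loop exits: max first-Z count rounded up to a block
def pvS (instructions : List String) (d : PySem.Dict String (List String))
    (starts : List String) : Nat :=
  instructions.length *
    (((starts.map (pvC instructions d)).foldl max 0 + instructions.length - 1) / instructions.length)

-- Pre_ is exactly the set of inputs on which the Python A terminates and raises no
-- exception: no empty-string key (key[-1] would raise), and if any ghost exists the
-- instruction list is nonempty, every ghost reaches a Z-node (first hit is within the
-- |keys|*|instructions| state-space bound whenever it exists at all), and every ghost's
-- path stays well-defined (keys present, enough choices, nonempty nodes) until the
-- lockstep loop exits at step pvS.
def Pre_run_ghosts (instructions : List String) (pointers : List (String × List String)) : Prop :=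
  (∀ k ∈ (PySem.Dict.ofList pointers).keys, k ≠ "") ∧
  (let d := PySem.Dict.ofList pointers
   let starts := d.keys.filter (fun key => pvLastIs key 'A')
   starts = [] ∨
     (0 < instructions.length ∧
      (∀ s ∈ starts, (pvFirstZ? instructions d (d.keys.length * instructions.length) s).isSome) ∧
      (∀ s ∈ starts, (pvTraj instructions d s (pvS instructions d starts)).isSome)))

instance (instructions : List String) (pointers : List (String × List String)) :
    Decidable (Pre_run_ghosts instructions pointers) := by unfold Pre_run_ghosts; infer_instance

def pvWitness_run_ghosts : List String × (List (String × List String)) :=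
  (["L"], [("AA", ["ZZ", "ZZ"]), ("ZZ", ["ZZ", "ZZ"])])

def Spec_run_ghosts (instructions : List String) (pointers : List (String × List String)) (out : Int) : Prop := out = run_ghosts_alt instructions pointers
instance (instructions : List String) (pointers : List (String × List String)) (out : Int) : Decidable (Spec_run_ghosts instructions pointers out) := by unfold Spec_run_ghosts; infer_instance

-- ===== CLAIM (what is proved, stated in full; the proofs are below) =====
def Claim_equal_run_ghosts : Prop := ∀ (instructions : List String) (pointers : List (String × List String)), Dom_run_ghosts instructions pointers → Pre_run_ghosts instructions pointers → Spec_run_ghosts instructions pointers (run_ghosts instructions pointers)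

-- ===== LEMMAS AND PROOFS =====

-- trajectory definedness is downward closed
theorem pvTraj_isSome_mono (instructions : List String) (d : PySem.Dict String (List String))
    (s : String) {t u : Nat} (h : t ≤ u) (hu : (pvTraj instructions d s u).isSome) :
    (pvTraj instructions d s t).isSome := by
  induction u with
  | zero => simpa [Nat.le_zero.mp h] using hu
  | succ u ih =>
    have hstep : (pvTraj instructions d s u).isSome := by
      unfold pvTraj at hu
      cases hX : pvTraj instructions d s u with
      | none => rw [hX] at hu; simp at hu
      | some _ => simp
    rcases Nat.lt_succ_iff_lt_or_eq.mp (Nat.lt_succ_of_le h) with hlt | heq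
    · exact ih (Nat.lt_succ_iff.mp hlt) hstep
    · rw [heq]; exact hu

-- find? over a range: the found index is least
theorem pvFind_range_spec {p : Nat → Bool} {bound t0 : Nat}
    (h : (List.range bound).find? p = some t0) :
    t0 < bound ∧ p t0 = true ∧ ∀ t < t0, p t = false := by
  rcases List.find?_eq_some_iff_append.mp h with ⟨hp, l1, l2, heq, hprev⟩
  have hlen : l1.length < bound := by
    have := congrArg List.length heq
    simp at this; omega
  have hl1 : l1 = List.range l1.length := by
    have h1 := List.take_left (l₁ := l1) (l₂ := t0 :: l2)
    rw [← heq, List.take_range, min_eq_left hlen.le] at h1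
    exact h1.symm
  have ht0 : t0 = l1.length := by
    have h2 : (List.range bound)[l1.length]? = some t0 := by
      rw [heq, List.getElem?_append_right (Nat.le_refl _)]
      simp
    have h3 : (List.range bound)[l1.length]? = some l1.length := by
      rw [List.getElem?_eq_getElem (by simpa using hlen)]
      simp
    rw [h3] at h2; exact (Option.some.inj h2).symm
  refine ⟨by omega, hp, fun t ht => ?_⟩
  have : t ∈ l1 := by rw [hl1]; simp; omega
  simpa using hprev t this

-- what a successful spec step says about the port-side arithmetic
theorem pvStep_elim {instructions : List String} {d : PySem.Dict String (List String)}
    {m : Nat} {node n' : String} (h : pvStep instructions d m node = some n') :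
    ∃ choices dir, PySem.Dict.getD d node [] = choices ∧
      instructions[m % instructions.length]? = some dir ∧
      ((if dir == "L" then choices.getD 0 "" else choices.getD 1 "") = n') := by
  unfold pvStep at h
  cases hg : PySem.Dict.get? d node with
  | none => rw [hg] at h; simp at h
  | some choices =>
    rw [hg] at h; dsimp only at h
    cases hi : instructions[m % instructions.length]? with
    | none => rw [hi] at h; simp at h
    | some dir =>
      rw [hi] at h; dsimp only at h
      refine ⟨choices, dir, PySem.Dict.getD_of_get?_eq_some d [] hg, rfl, ?_⟩
      by_cases hL : dir == "L"
      · rw [if_pos hL] at h ⊢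
        cases hc : choices[0]? with
        | none => rw [hc] at h; simp at h
        | some x =>
          rw [hc] at h; dsimp only at h
          have hx : x = n' := by
            by_cases hxe : x = ""
            · rw [if_pos hxe] at h; simp at h
            · rw [if_neg hxe] at h; exact Option.some.inj h
          rw [List.getD_eq_getElem?_getD, hc, hx]; rfl
      · rw [if_neg hL] at h ⊢
        cases hc : choices[1]? with
        | none => rw [hc] at h; simp at h
        | some x =>
          rw [hc] at h; dsimp only at h
          have hx : x = n' := by
            by_cases hxe : x = ""
            · rw [if_pos hxe] at h; simp at h
            · rw [if_neg hxe] at h; exact Option.some.inj h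
          rw [List.getD_eq_getElem?_getD, hc, hx]; rfl

-- the package of facts each ghost carries through the proofs (S = exit step of A's loop)
def pvGood (instructions : List String) (d : PySem.Dict String (List String))
    (S : Nat) (s : String) : Prop :=
  (∀ u, u ≤ S → (pvTraj instructions d s u).isSome) ∧
  1 ≤ pvC instructions d s ∧
  (∀ u n, 1 ≤ u → u ≤ pvC instructions d s → pvTraj instructions d s u = some n →
    pvLastIs n 'Z' = decide (u = pvC instructions d s))

-- B's walk returns the first-Z step count
theorem pvCountSteps_eq (instructions : List String) (d : PySem.Dict String (List String))
    (S : Nat) (s : String) (hg : pvGood instructions d S s)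
    (hcS : pvC instructions d s ≤ S) :
    ∀ fuel t node, pvTraj instructions d s t = some node → t < pvC instructions d s →
      pvC instructions d s ≤ t + fuel →
      pvCountSteps instructions d fuel node t = pvC instructions d s := by
  intro fuel
  induction fuel with
  | zero => intro t node _ h1 h2; omega
  | succ fuel ih =>
    intro t node htraj hlt hle
    have ht1 : (pvTraj instructions d s (t+1)).isSome :=
      hg.1 (t+1) (le_trans (Nat.succ_le_of_lt hlt) hcS)
    obtain ⟨n', hn'⟩ := Option.isSome_iff_exists.mp ht1
    have hstep : pvStep instructions d t node = some n' := by
      have hb : pvTraj instructions d s (t+1)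
          = (pvTraj instructions d s t).bind (pvStep instructions d t) := rfl
      rw [hb, htraj] at hn'; simpa using hn'
    obtain ⟨choices, dir, hgd, hi, hval⟩ := pvStep_elim hstep
    have hZ := hg.2.2 (t+1) n' (by omega) (Nat.succ_le_of_lt hlt) hn'
    show pvCountSteps instructions d (fuel+1) node t = pvC instructions d s
    unfold pvCountSteps
    simp only [List.getD_eq_getElem?_getD, beq_iff_eq] at hval
    simp only [hgd, List.getD_eq_getElem?_getD, beq_iff_eq, hi, Option.getD_some]
    rw [hval, hZ]
    by_cases hc : t + 1 = pvC instructions d s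
    · simp [hc]
    · simp only [hc, decide_false, Bool.false_eq_true, if_false]
      exact ih (t+1) n' hn' (by omega) (by omega)

-- A's lockstep state after m steps, phrased per ghost
def pvStA (instructions : List String) (d : PySem.Dict String (List String))
    (ss : List String) (m : Nat) : List String × List Nat × Nat :=
  (ss.map (fun s => (pvTraj instructions d s m).getD ""),
   ss.map (fun s => if pvC instructions d s ≤ m then pvC instructions d s else 0),
   m)

theorem pvBlockStep_eq (instructions : List String) (d : PySem.Dict String (List String))
    (S : Nat) (ss : List String) (hss : ∀ s ∈ ss, pvGood instructions d S s)
    (dir : String) (m : Nat) (hm : instructions[m % instructions.length]? = some dir)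
    (hmS : m + 1 ≤ S) :
    pvBlockStep d dir (pvStA instructions d ss m) = pvStA instructions d ss (m+1) := by
  have key : ∀ s ∈ ss,
      (fun lc : String × Nat =>
        let choices := PySem.Dict.getD d lc.1 []
        let newLoc := if dir == "L" then choices.getD 0 "" else choices.getD 1 ""
        (newLoc, if pvLastIs newLoc 'Z' && lc.2 == 0 then m + 1 else lc.2))
        ((pvTraj instructions d s m).getD "",
         if pvC instructions d s ≤ m then pvC instructions d s else 0)
      = ((pvTraj instructions d s (m+1)).getD "",
         if pvC instructions d s ≤ m + 1 then pvC instructions d s else 0) := by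
    intro s hs
    obtain ⟨hdef, hone, hzchar⟩ := hss s hs
    obtain ⟨node, hnode⟩ := Option.isSome_iff_exists.mp (hdef m (by omega))
    obtain ⟨n', hn'⟩ := Option.isSome_iff_exists.mp (hdef (m+1) hmS)
    have hstep : pvStep instructions d m node = some n' := by
      have hb : pvTraj instructions d s (m+1)
          = (pvTraj instructions d s m).bind (pvStep instructions d m) := rfl
      rw [hb, hnode] at hn'; simpa using hn'
    obtain ⟨choices, dir', hgd, hi, hval⟩ := pvStep_elim hstep
    have hdir : dir' = dir := by rw [hm] at hi; exact (Option.some.inj hi).symm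
    rw [hdir] at hval
    dsimp only
    rw [hnode, Option.getD_some, hgd, hval, hn', Option.getD_some]
    refine congrArg (fun z => (n', z)) ?_
    by_cases hcm : pvC instructions d s ≤ m
    · have : (if pvC instructions d s ≤ m then pvC instructions d s else 0) = pvC instructions d s :=
        if_pos hcm
      rw [this]
      have hne : (pvC instructions d s == 0) = false := by
        simp only [beq_eq_false_iff_ne, ne_eq]; omega
      rw [hne, Bool.and_false, if_neg (by simp), if_pos (by omega)]
    · have h0 : (if pvC instructions d s ≤ m then pvC instructions d s else 0) = 0 := if_neg hcm
      rw [h0]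
      have hZ := hzchar (m+1) n' (by omega) (by omega) hn'
      by_cases hc : m + 1 = pvC instructions d s
      · rw [hZ]; simp [← hc]
      · rw [hZ]
        have hgt : ¬ pvC instructions d s ≤ m + 1 := by omega
        simp [hc, hgt]
  unfold pvBlockStep pvStA
  dsimp only
  rw [List.zip_map', List.map_map]
  refine congrArg₂ Prod.mk ?_ (congrArg₂ Prod.mk ?_ rfl)
  · rw [List.map_map]
    exact List.map_congr_left (fun s hs => congrArg Prod.fst (key s hs))
  · rw [List.map_map, List.map_map]
    exact List.map_congr_left (fun s hs => congrArg Prod.snd (key s hs))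

theorem pvFold_block (instructions : List String) (d : PySem.Dict String (List String))
    (S : Nat) (ss : List String) (hss : ∀ s ∈ ss, pvGood instructions d S s)
    (b : Nat) (hb : (b+1) * instructions.length ≤ S) :
    ∀ suff pref, instructions = pref ++ suff →
      suff.foldl (fun st dir => pvBlockStep d dir st)
        (pvStA instructions d ss (b * instructions.length + pref.length)) =
      pvStA instructions d ss (b * instructions.length + instructions.length) := by
  intro suff
  induction suff with
  | nil =>
    intro pref hpref
    rw [List.foldl_nil]
    have hlen : pref.length = instructions.length := by rw [hpref]; simp
    rw [hlen]
  | cons dir rest ih =>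
    intro pref hpref
    have hplen : pref.length < instructions.length := by
      have := congrArg List.length hpref; simp at this; omega
    have hmod : (b * instructions.length + pref.length) % instructions.length = pref.length := by
      rw [Nat.mul_comm, Nat.mul_add_mod]; exact Nat.mod_eq_of_lt hplen
    have hm : instructions[(b * instructions.length + pref.length) % instructions.length]?
        = some dir := by
      rw [hmod]
      conv_lhs => rw [hpref]
      rw [List.getElem?_append_right (Nat.le_refl _)]
      simp
    have hb1 : b * instructions.length + pref.length + 1 ≤ S := by
      have : (b+1) * instructions.length = b * instructions.length + instructions.length :=
        Nat.succ_mul _ _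
      omega
    rw [List.foldl_cons, pvBlockStep_eq instructions d S ss hss dir _ hm hb1]
    have := ih (pref ++ [dir]) (by rw [hpref]; simp)
    simpa using this

theorem pvInit_le_foldl_max (l : List Nat) (init : Nat) : init ≤ l.foldl max init := by
  induction l generalizing init with
  | nil => simp
  | cons y ys ih => exact le_trans (le_max_left _ _) (ih _)

theorem pvLe_foldl_max (l : List Nat) (a : Nat) (h : a ∈ l) (init : Nat) :
    a ≤ l.foldl max init := by
  induction l generalizing init with
  | nil => simp at h
  | cons x xs ih =>
    rcases List.mem_cons.mp h with rfl | hmem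
    · exact le_trans (le_max_right init a) (pvInit_le_foldl_max xs _)
    · exact ih hmem _

theorem pvFoldl_max_le (l : List Nat) (init b : Nat) (h : init ≤ b) (h2 : ∀ a ∈ l, a ≤ b) :
    l.foldl max init ≤ b := by
  induction l generalizing init with
  | nil => simpa using h
  | cons x xs ih =>
    simp only [List.foldl_cons]
    exact ih _ (max_le h (h2 x (by simp))) (fun a ha => h2 a (by simp [ha]))

theorem pvLoopA_eq (instructions : List String) (d : PySem.Dict String (List String))
    (ss : List String) (B : Nat)
    (hss : ∀ s ∈ ss, pvGood instructions d (B * instructions.length) s)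
    (hub : ∀ s ∈ ss, pvC instructions d s ≤ B * instructions.length) :
    ∀ fuel b, b ≤ B → B < b + fuel →
      pvLoopA instructions d fuel (pvStA instructions d ss (b * instructions.length)) =
      ss.map (pvC instructions d) := by
  intro fuel
  induction fuel with
  | zero => intro b hb hB; omega
  | succ fuel ih =>
    intro b hb hB
    unfold pvLoopA
    by_cases hall : ∀ s ∈ ss, pvC instructions d s ≤ b * instructions.length
    · have hcheck : ((pvStA instructions d ss (b * instructions.length)).2.1.all
          (fun c => c != 0)) = true := by
        simp only [pvStA, List.all_eq_true, List.mem_map]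
        rintro c ⟨s, hs, rfl⟩
        have h1 := (hss s hs).2.1
        simp only [if_pos (hall s hs), bne_iff_ne, ne_eq]
        omega
      rw [if_pos hcheck]
      simp only [pvStA]
      exact List.map_congr_left fun s hs => if_pos (hall s hs)
    · have hcheck : ((pvStA instructions d ss (b * instructions.length)).2.1.all
          (fun c => c != 0)) = false := by
        push_neg at hall
        obtain ⟨s, hs, hgt⟩ := hall
        simp only [List.all_eq_false, pvStA, List.mem_map]
        exact ⟨0, ⟨s, hs, if_neg (by omega)⟩, by simp⟩
      rw [hcheck]
      simp only [Bool.false_eq_true, if_false]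
      have hbB : b < B := by
        by_contra hge
        push_neg at hge
        apply hall
        intro s hs
        exact le_trans (hub s hs) (Nat.mul_le_mul_right _ hge)
      have hfold := pvFold_block instructions d (B * instructions.length) ss hss b
        (Nat.mul_le_mul_right _ (by omega)) instructions [] (by simp)
      simp only [List.length_nil, Nat.add_zero] at hfold
      rw [hfold]
      have harg : b * instructions.length + instructions.length
          = (b+1) * instructions.length := (Nat.succ_mul _ _).symm
      rw [harg]
      exact ih (b+1) (by omega) (by omega)

theorem pvMain (instructions : List String) (d : PySem.Dict String (List String))
    (ss : List String) (hL : 0 < instructions.length)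
    (hz : ∀ s ∈ ss, (pvFirstZ? instructions d (d.keys.length * instructions.length) s).isSome)
    (htr : ∀ s ∈ ss, (pvTraj instructions d s (pvS instructions d ss)).isSome) :
    pvLoopA instructions d (d.keys.length + 1) (ss, List.replicate ss.length 0, 0)
      = ss.map (pvC instructions d) ∧
    ∀ s ∈ ss, pvCountSteps instructions d (d.keys.length * instructions.length + 1) s 0
      = pvC instructions d s := by
  have hfs : ∀ s ∈ ss, pvFirstZ? instructions d (d.keys.length * instructions.length) s
      = some (pvC instructions d s) := by
    intro s hs
    obtain ⟨c, hc⟩ := Option.isSome_iff_exists.mp (hz s hs)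
    rw [hc]; unfold pvC; rw [hc]; rfl
  have hfacts : ∀ s ∈ ss, 1 ≤ pvC instructions d s ∧
      pvC instructions d s ≤ d.keys.length * instructions.length ∧
      (∀ u n, 1 ≤ u → u ≤ pvC instructions d s → pvTraj instructions d s u = some n →
        pvLastIs n 'Z' = decide (u = pvC instructions d s)) := by
    intro s hs
    have h1 := hfs s hs
    unfold pvFirstZ? at h1
    obtain ⟨t0, hfind, hplus⟩ := Option.map_eq_some_iff.mp h1
    obtain ⟨hbnd, hp, hprev⟩ := pvFind_range_spec hfind
    refine ⟨by omega, by omega, ?_⟩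
    intro u n hu1 huc htraju
    by_cases hue : u = pvC instructions d s
    · have hu' : u = t0 + 1 := by omega
      rw [hu'] at htraju
      rw [htraju] at hp
      simp only [Option.map_some, Option.getD_some] at hp
      rw [hp]; simp [hue]
    · have hlt : u - 1 < t0 := by omega
      have hf := hprev (u - 1) hlt
      rw [show u - 1 + 1 = u from by omega, htraju] at hf
      simp only [Option.map_some, Option.getD_some] at hf
      rw [hf]; simp [hue]
  have hmaxKL : (ss.map (pvC instructions d)).foldl max 0
      ≤ d.keys.length * instructions.length := by
    apply pvFoldl_max_le _ _ _ (Nat.zero_le _)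
    intro a ha
    obtain ⟨s, hs, rfl⟩ := List.mem_map.mp ha
    exact (hfacts s hs).2.1
  have hMleS : (ss.map (pvC instructions d)).foldl max 0 ≤ pvS instructions d ss := by
    unfold pvS
    have hdm := Nat.div_add_mod
      ((ss.map (pvC instructions d)).foldl max 0 + instructions.length - 1) instructions.length
    have hmod := Nat.mod_lt
      ((ss.map (pvC instructions d)).foldl max 0 + instructions.length - 1) hL
    generalize hgen : instructions.length *
      (((ss.map (pvC instructions d)).foldl max 0 + instructions.length - 1) /
        instructions.length) = p at hdm ⊢
    omega
  have hq : pvS instructions d ss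
      = ((ss.map (pvC instructions d)).foldl max 0 + instructions.length - 1) /
          instructions.length * instructions.length := by
    unfold pvS; rw [Nat.mul_comm]
  have hBK : ((ss.map (pvC instructions d)).foldl max 0 + instructions.length - 1) /
      instructions.length ≤ d.keys.length := by
    rw [Nat.div_le_iff_le_mul_add_pred hL, Nat.mul_comm]
    generalize hgen : d.keys.length * instructions.length = kl at hmaxKL ⊢
    omega
  have hgood : ∀ s ∈ ss, pvGood instructions d
      (((ss.map (pvC instructions d)).foldl max 0 + instructions.length - 1) /
        instructions.length * instructions.length) s := by
    intro s hs
    refine ⟨fun u hu => pvTraj_isSome_mono _ _ _ hu ?_, (hfacts s hs).1, (hfacts s hs).2.2⟩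
    rw [← hq]; exact htr s hs
  have hub : ∀ s ∈ ss, pvC instructions d s
      ≤ ((ss.map (pvC instructions d)).foldl max 0 + instructions.length - 1) /
          instructions.length * instructions.length := by
    intro s hs
    refine le_trans (pvLe_foldl_max _ _ (List.mem_map_of_mem hs) 0) ?_
    rw [← hq]; exact hMleS
  constructor
  · have hinit : ((ss, List.replicate ss.length 0, 0) : List String × List Nat × Nat)
        = pvStA instructions d ss (0 * instructions.length) := by
      unfold pvStA
      rw [Nat.zero_mul]
      refine congrArg₂ Prod.mk ?_ (congrArg₂ Prod.mk ?_ rfl)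
      · symm; simp [pvTraj]
      · symm
        rw [List.map_congr_left
          (fun s hs => if_neg (by have := (hfacts s hs).1; omega)), List.map_const']
    rw [hinit]
    exact pvLoopA_eq instructions d ss _ hgood hub (d.keys.length + 1) 0 (Nat.zero_le _)
      (by omega)
  · intro s hs
    refine pvCountSteps_eq instructions d _ s (hgood s hs) (hub s hs)
      (d.keys.length * instructions.length + 1) 0 s rfl
      (by have := (hfacts s hs).1; omega) ?_
    have := (hfacts s hs).2.1; omega

-- ===== VERDICT (by name: the statement is the Claim_ definition above) =====
theorem run_ghosts_spec : Claim_equal_run_ghosts := by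
  intro instructions pointers hdom hpre
  unfold Spec_run_ghosts
  obtain ⟨hkeys, hcase⟩ := hpre
  dsimp only at hcase
  unfold run_ghosts run_ghosts_alt
  dsimp only
  rcases hcase with hempty | ⟨hL, hz, htr⟩
  · rw [hempty]
    simp [pvLoopA]
  · obtain ⟨hA, hB⟩ := pvMain instructions (PySem.Dict.ofList pointers) _ hL hz htr
    rw [hA, List.map_congr_left hB]
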